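-- pv_equiv track=rewrite | github.com/jethack23/projecteuler | p095_amicable_chains.py | solution
-- ===== SOURCE A (Python) =====
-- from collections import Counter
--
-- def primes(n):
--     rst = [0, 0] + [1] * n
--     for [i, pp] in enumerate(rst):
--         if pp:
--             for j in range(2 * i, n + 1, i):
--                 rst[j] = 0
--     return [i for [i, p] in enumerate(rst) if p]
--
-- def factor_sum(factors, f=1):
--     if not factors:
--         return f
--     else:
--         [p, n] = factors.pop()
--         rst = 0
--         this_p = 1
--         for i in range(n + 1):
--             rst += factor_sum(factors, f * this_p)
--             this_p *= p
--         factors.append([p, n])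
--         return rst
--
-- def solution(n):
--     ps = primes(n)
--     met = set()
--
--     def prime_factors(n):
--         rst = Counter()
--         for p in ps:
--             if p > n:
--                 break
--             while n % p == 0:
--                 rst[p] += 1
--                 n //= p
--         return list(rst.items())
--
--     mem = 0
--     rst = 0
--     for i in range(2, n + 1):
--         if i in met:
--             continue
--         met.add(i)
--         ami_chain = [i]
--         t = i
--         while (
--             (t := (factor_sum(prime_factors(t)) - t)) <= n
--             and t != 1
--             and (not t in met)
--             and (not t in ami_chain)
--         ):
--             ami_chain.append(t)
--             met.add(t)
--         if t in ami_chain: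
--             pos = ami_chain.index(t)
--             if len(ami_chain) - pos > mem:
--                 mem = len(ami_chain) - pos
--                 rst = min(ami_chain[pos:])
--     return rst
-- ===== SOURCE B (Python) =====
-- def solution(n):
--     # additive sieve: s[m] = sum of proper divisors of m, for 0 <= m <= n
--     s = [0] * (n + 1)
--     for d in range(1, n + 1):
--         for m in range(2 * d, n + 1, d):
--             s[m] += d
--     met = set()
--     best_len = 0
--     best_min = 0
--     for i in range(2, n + 1):
--         if i in met:
--             continue
--         met.add(i)
--         chain = [i]
--         t = i
--         while True:
--             t = s[t]
--             if t > n or t == 1 or t in met or t in chain: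
--                 break
--             chain.append(t)
--             met.add(t)
--         if t in chain:
--             pos = chain.index(t)
--             if len(chain) - pos > best_len:
--                 best_len = len(chain) - pos
--                 best_min = min(chain[pos:])
--     return best_min
-- ===== Notes on version B (the rewrite author's own statement) =====
-- stated objective: faster
-- what changed: A refactors every chain element from scratch (prime sieve + trial division + a recursive divisor-sum product over the factorization); B precomputes one additive sieve of proper-divisor sums (add each d to all its multiples) and the chain walk becomes a table lookup.
import Mathlib
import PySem

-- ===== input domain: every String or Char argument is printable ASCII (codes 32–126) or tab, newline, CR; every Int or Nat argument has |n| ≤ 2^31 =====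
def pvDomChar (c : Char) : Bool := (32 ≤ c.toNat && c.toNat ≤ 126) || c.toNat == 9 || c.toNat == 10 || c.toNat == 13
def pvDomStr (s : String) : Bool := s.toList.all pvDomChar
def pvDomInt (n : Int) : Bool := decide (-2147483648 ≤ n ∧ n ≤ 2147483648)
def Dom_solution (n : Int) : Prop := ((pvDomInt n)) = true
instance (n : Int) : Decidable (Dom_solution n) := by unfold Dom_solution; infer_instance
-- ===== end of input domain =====

-- B replaces A's per-step refactoring (prime sieve + trial division + recursive divisor-sum
-- product) by one additive proper-divisor-sum sieve consulted by the same chain walk; the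
-- timing run measured B faster (asymptotic mechanism: O(n log n) sieve vs factoring each step).


-- ===== PORT A =====

-- primes(n): boolean array sieve read with enumerate while being mutated (marks only lie
-- strictly ahead of the cursor, so reading the current array at each index is exact)
def primesA (n : Int) : List Int :=
  let init : List Int := [0, 0] ++ List.replicate n.toNat 1
  let final := (List.range init.length).foldl
    (fun rst (i : Nat) =>
      if PySem.List.pyGetD rst (i : Int) 0 ≠ 0 then
        (PySem.List.pyRange (2 * (i : Int)) (n + 1) (i : Int)).foldl
          (fun r j => PySem.List.pySetD r j 0) rst
      else rst) init
  ((PySem.List.enumerate final).filter (fun p => p.2 != 0)).map (·.1)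

-- factor_sum: factors.pop() reads the LAST element (restored by append afterwards, so
-- functionally the list argument is unchanged: we read getLast/dropLast)
mutual
def factorSum (factors : List (Int × Int)) (f : Int) : Int :=
  if h : factors.isEmpty then f
  else
    let pe := factors.getLast?.getD (0, 0)
    (fsLoop factors.dropLast pe.1 f (pe.2 + 1).toNat 0 1).1
termination_by (2 * factors.length, 0)
decreasing_by
  have hne : factors ≠ [] := by simpa [List.isEmpty_iff] using h
  have := List.length_pos_iff.mpr hne
  simp [List.length_dropLast]; omega
def fsLoop (rest : List (Int × Int)) (p f : Int) (k : Nat) (rst thisP : Int) : Int × Int :=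
  match k with
  | 0 => (rst, thisP)
  | k' + 1 => fsLoop rest p f k' (rst + factorSum rest (f * thisP)) (thisP * p)
termination_by (2 * rest.length + 1, k)
decreasing_by
  · exact Prod.Lex.left _ _ (by omega)
  · exact Prod.Lex.right _ (Nat.lt_succ_self k')
end

-- 'while n % p == 0: rst[p] += 1; n //= p' — fuel r.toNat + 1 bounds the number of
-- divisions by p ≥ 2 of a positive r (only such calls are reachable from solution)
def divideOutA (p : Int) (d : PySem.Dict Int Int) (r : Int) (fuel : Nat) : PySem.Dict Int Int × Int :=
  match fuel with
  | 0 => (d, r)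
  | k + 1 =>
    if PySem.Int.mod r p = 0 then
      divideOutA p (d.modify p 0 (· + 1)) (PySem.Int.floordiv r p) k
    else (d, r)

-- the 'for p in ps: if p > n: break; while …' loop of prime_factors
def pfLoopA (ps : List Int) (d : PySem.Dict Int Int) (r : Int) : PySem.Dict Int Int :=
  match ps with
  | [] => d
  | p :: rest =>
    if p > r then d
    else
      let dr := divideOutA p d r (r.toNat + 1)
      pfLoopA rest dr.1 dr.2

def primeFactorsA (ps : List Int) (t : Int) : List (Int × Int) :=
  (pfLoopA ps PySem.Dict.empty t).items

def stepA (ps : List Int) (t : Int) : Int := factorSum (primeFactorsA ps t) 1 - t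

-- the walrus while-loop; fuel n.toNat + 2 bounds the chain length (distinct members of 2..n)
def chainLoopA (n : Int) (ps : List Int) (fuel : Nat) (met : PySem.Set Int) (chain : List Int) (t : Int) : PySem.Set Int × List Int × Int :=
  match fuel with
  | 0 => (met, chain, t)
  | k + 1 =>
    let t' := stepA ps t
    if t' ≤ n ∧ t' ≠ 1 ∧ t' ∉ met ∧ t' ∉ chain then
      chainLoopA n ps k (PySem.Set.add met t') (chain ++ [t']) t'
    else (met, chain, t')

def solution (n : Int) : Int :=
  let ps := primesA n
  -- state: (met, mem, rst); min(ami_chain[pos:]) is taken under 't in ami_chain', where the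
  -- slice is nonempty, so the total .getD 0 form of min is exact
  let res := (PySem.List.pyRange 2 (n + 1) 1).foldl
    (fun (st : PySem.Set Int × Int × Int) i =>
      if i ∈ st.1 then st
      else
        let r := chainLoopA n ps (n.toNat + 2) (PySem.Set.add st.1 i) [i] i
        if r.2.2 ∈ r.2.1 then
          let pos : Int := ((PySem.List.index? r.2.1 r.2.2).getD 0 : Nat)
          if (r.2.1.length : Int) - pos > st.2.1 then
            (r.1, (r.2.1.length : Int) - pos,
              (PySem.List.min? (PySem.List.slice r.2.1 (some pos) none) (fun x => x)).getD 0)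
          else (r.1, st.2.1, st.2.2)
        else (r.1, st.2.1, st.2.2))
    (PySem.Set.empty, 0, 0)
  res.2.2

-- ===== PORT B =====

-- additive sieve: s[m] += d for every multiple m of d (all indices written are in range,
-- so the total pySetD/pyGetD forms are exact)
def sieveB (n : Int) : List Int :=
  (PySem.List.pyRange 1 (n + 1) 1).foldl
    (fun s d =>
      (PySem.List.pyRange (2 * d) (n + 1) d).foldl
        (fun s m => PySem.List.pySetD s m (PySem.List.pyGetD s m 0 + d)) s)
    (List.replicate (n + 1).toNat 0)

-- 'while True: t = s[t]; if …: break' (t stays in 2..n, so s[t] is in range)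
def chainLoopB (n : Int) (s : List Int) (fuel : Nat) (met : PySem.Set Int) (chain : List Int) (t : Int) : PySem.Set Int × List Int × Int :=
  match fuel with
  | 0 => (met, chain, t)
  | k + 1 =>
    let t' := PySem.List.pyGetD s t 0
    if t' > n ∨ t' = 1 ∨ t' ∈ met ∨ t' ∈ chain then (met, chain, t')
    else chainLoopB n s k (PySem.Set.add met t') (chain ++ [t']) t'

def solution_alt (n : Int) : Int :=
  let s := sieveB n
  -- state: (met, best_len, best_min)
  let res := (PySem.List.pyRange 2 (n + 1) 1).foldl
    (fun (st : PySem.Set Int × Int × Int) i =>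
      if i ∈ st.1 then st
      else
        let r := chainLoopB n s (n.toNat + 2) (PySem.Set.add st.1 i) [i] i
        if r.2.2 ∈ r.2.1 then
          let pos : Int := ((PySem.List.index? r.2.1 r.2.2).getD 0 : Nat)
          if (r.2.1.length : Int) - pos > st.2.1 then
            (r.1, (r.2.1.length : Int) - pos,
              (PySem.List.min? (PySem.List.slice r.2.1 (some pos) none) (fun x => x)).getD 0)
          else (r.1, st.2.1, st.2.2)
        else (r.1, st.2.1, st.2.2))
    (PySem.Set.empty, 0, 0)
  res.2.2

-- ===== PRECONDITION & SPEC =====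
def Spec_solution (n : Int) (out : Int) : Prop := out = solution_alt n
instance (n : Int) (out : Int) : Decidable (Spec_solution n out) := by unfold Spec_solution; infer_instance

-- ===== CLAIM (what is proved, stated in full; the proofs are below) =====
def Claim_equal_solution : Prop := ∀ (n : Int), Dom_solution n → Spec_solution n (solution n)

-- ===== LEMMAS AND PROOFS =====

-- the common mathematical value: sum of divisors, as an Int
def sigmaI (t : Int) : Int := ((∑ d ∈ Nat.divisors t.toNat, d : Nat) : Int)
def geomI (p e : Int) : Int := ((List.range (e + 1).toNat).map (fun i => p ^ i)).sum

-- ---- A side: factorSum is the product of geometric sums ----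

theorem fsLoop_eq (rest : List (Int × Int)) (p f : Int) (k : Nat) (rst tp : Int) :
    fsLoop rest p f k rst tp =
      (rst + ((List.range k).map (fun i => factorSum rest (f * (tp * p ^ i)))).sum, tp * p ^ k) := by
  induction k generalizing rst tp with
  | zero => simp [fsLoop]
  | succ k ih =>
    rw [fsLoop, ih]
    have harg : ∀ i : Nat, f * (tp * p * p ^ i) = f * (tp * p ^ (i+1)) := by intro i; ring
    refine Prod.ext ?_ ?_
    · show rst + factorSum rest (f * tp) + _ = rst + _
      simp only [List.range_succ_eq_map, List.map_cons, List.map_map, List.sum_cons]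
      have : (List.map ((fun i => factorSum rest (f * (tp * p ^ i))) ∘ fun i => i + 1) (List.range k))
           = List.map (fun i => factorSum rest (f * (tp * p * p ^ i))) (List.range k) := by
        refine List.map_congr_left fun i _ => ?_
        simp only [Function.comp]; rw [harg i]
      rw [this]; simp [mul_comm, pow_zero]; ring
    · show tp * p * p ^ k = tp * p ^ (k + 1); ring

theorem factorSum_eq (L : List (Int × Int)) (f : Int) :
    factorSum L f = f * (L.map (fun pe => geomI pe.1 pe.2)).prod := by
  induction L using List.reverseRecOn generalizing f with
  | nil => simp [factorSum]
  | append_singleton l a ih =>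
    rw [factorSum]
    rw [dif_neg (by simp : ¬ (l ++ [a]).isEmpty = true)]
    simp only [List.getLast?_concat, List.dropLast_concat, Option.getD_some]
    rw [fsLoop_eq]
    have hmap : List.map (fun i => factorSum l (f * (1 * a.1 ^ i))) (List.range (a.2 + 1).toNat)
        = List.map (fun i => (f * (l.map (fun pe => geomI pe.1 pe.2)).prod) * a.1 ^ i)
            (List.range (a.2 + 1).toNat) := by
      refine List.map_congr_left fun i _ => ?_
      rw [ih]; ring
    show 0 + _ = _
    rw [hmap, List.sum_map_mul_left]
    simp only [List.map_append, List.prod_append, List.map_cons, List.map_nil,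
      List.prod_cons, List.prod_nil, geomI]
    ring

-- ---- A side: trial division produces the prime factorisation, whose geometric
-- ---- product is the divisor sum ----

theorem divideOutA_spec (p : Int) (hp : 2 ≤ p) :
    ∀ (fuel : Nat) (r : Int) (d : PySem.Dict Int Int), 1 ≤ r → r.toNat ≤ fuel →
    ∃ (e : Nat) (r' : Int),
      divideOutA p d r fuel = ((fun dd => dd.modify p 0 (· + 1))^[e] d, r') ∧
      r = r' * p ^ e ∧ ¬ (p ∣ r') ∧ 1 ≤ r' := by
  intro fuel
  induction fuel with
  | zero => intro r d h1 h2; omega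
  | succ k ih =>
    intro r d h1 h2
    rw [divideOutA]
    by_cases hdvd : p ∣ r
    · rw [if_pos ((PySem.Int.mod_eq_zero_iff_dvd r p).mpr hdvd)]
      have hfd : PySem.Int.floordiv r p = r / p := PySem.Int.floordiv_eq_ediv_of_pos (by omega)
      have hrp : r = (r / p) * p := (Int.ediv_mul_cancel hdvd).symm
      have h1' : 1 ≤ r / p := by
        rcases hdvd with ⟨c, hc⟩
        have : 0 < c := by nlinarith
        have : r / p = c := by rw [hc]; rw [Int.mul_ediv_cancel_left _ (by omega : p ≠ 0)]
        omega
      have hlt : r / p < r := by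
        have : r / p * 1 < r / p * p := by
          have := h1'
          nlinarith
        omega
      have h2' : (r / p).toNat ≤ k := by omega
      obtain ⟨e, r', heq, hmul, hnd, hr1⟩ := ih (r / p) (d.modify p 0 (· + 1)) h1' h2'
      refine ⟨e + 1, r', ?_, ?_, hnd, hr1⟩
      · rw [hfd, heq, Function.iterate_succ_apply]
      · rw [pow_succ, ← mul_assoc, ← hmul]
        omega
    · rw [if_neg (fun h => hdvd ((PySem.Int.mod_eq_zero_iff_dvd r p).mp h))]
      exact ⟨0, r, by simp, by simp, hdvd, h1⟩

theorem iterate_modify_spec (p : Int) :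
    ∀ (e : Nat), 1 ≤ e → ∀ (d : PySem.Dict Int Int), d.keys.Nodup → p ∉ d.keys →
    ((fun dd => dd.modify p 0 (· + 1))^[e] d).items = d.items ++ [(p, (e : Int))] := by
  intro e
  induction e with
  | zero => omega
  | succ e ih =>
    intro _ d hnd hnp
    by_cases he : 1 ≤ e
    · rw [Function.iterate_succ_apply']
      have hitems := ih he d hnd hnp
      have hkeys : ((fun dd => dd.modify p 0 (· + 1))^[e] d).keys = d.keys ++ [p] := by
        show (((fun dd => dd.modify p 0 (· + 1))^[e] d).items.map (·.1)) = _
        rw [hitems]; simp; rfl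
      have hknd : ((fun dd => dd.modify p 0 (· + 1))^[e] d).keys.Nodup := by
        rw [hkeys, List.nodup_append]
        refine ⟨hnd, List.nodup_singleton _, ?_⟩
        intro a ha b hb
        have hb' : b = p := by simpa using hb
        subst hb'
        intro hab
        exact hnp (hab ▸ ha)
      have hcont : ((fun dd => dd.modify p 0 (· + 1))^[e] d).contains p = true := by
        rw [PySem.Dict.contains_iff_mem_keys, hkeys]; simp
      have hgetD : ((fun dd => dd.modify p 0 (· + 1))^[e] d).getD p 0 = (e : Int) := by
        refine PySem.Dict.getD_of_mem_items _ ?_ hknd 0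
        rw [hitems]; simp
      show (PySem.Dict.insert _ p _).items = _
      rw [PySem.Dict.items_insert_of_contains _ _ hcont, hgetD, hitems]
      rw [List.map_append]
      have hleft : List.map (fun q => if (q.1 == p) = true then (p, (e : Int) + 1) else q) d.items
          = List.map id d.items := by
        refine List.map_congr_left fun q hq => ?_
        have hqp : q.1 ≠ p := by
          intro hqp
          exact hnp (show p ∈ d.items.map (·.1) from List.mem_map.mpr ⟨q, hq, hqp⟩)
        simp [hqp]
      rw [hleft, List.map_id]
      push_cast
      simp
    · have he0 : e = 0 := by omega
      subst he0
      rw [Function.iterate_one]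
      have hcont : d.contains p = false := by
        rw [Bool.eq_false_iff]
        intro hc
        exact hnp ((PySem.Dict.contains_iff_mem_keys d p).mp hc)
      show (PySem.Dict.insert d p (d.getD p 0 + 1)).items = _
      rw [PySem.Dict.getD_of_not_contains d 0 hcont]
      rw [PySem.Dict.items_insert_of_not_contains d _ hcont]
      norm_num

theorem sigmaI_one : sigmaI 1 = 1 := by simp [sigmaI]

theorem list_sum_range_eq (n : Nat) (f : Nat → Int) :
    ((List.range n).map f).sum = ∑ i ∈ Finset.range n, f i := by
  induction n with
  | zero => simp
  | succ n ih => rw [List.range_succ, Finset.sum_range_succ, List.map_append, List.sum_append, ih]; simp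

theorem geomI_prime_pow (p : Int) (hp2 : 2 ≤ p) (hp : Nat.Prime p.toNat) (e : Nat) :
    geomI p (e : Int) = ((∑ d ∈ Nat.divisors (p.toNat ^ e), d : Nat) : Int) := by
  rw [Nat.sum_divisors_prime_pow hp]
  unfold geomI
  have h1 : ((e : Int) + 1).toNat = e + 1 := by omega
  rw [h1, list_sum_range_eq]
  push_cast
  refine Finset.sum_congr rfl fun i _ => ?_
  rw [Int.toNat_of_nonneg (by omega)]

theorem sigmaI_mul (p r' : Int) (hp2 : 2 ≤ p) (hp : Nat.Prime p.toNat) (e : Nat)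
    (hr' : 1 ≤ r') (hnd : ¬ p ∣ r') :
    sigmaI (r' * p ^ e) = geomI p (e : Int) * sigmaI r' := by
  rw [geomI_prime_pow p hp2 hp e]
  unfold sigmaI
  have hco : Nat.Coprime (p.toNat ^ e) r'.toNat := by
    refine Nat.Coprime.pow_left e ?_
    refine (Nat.Prime.coprime_iff_not_dvd hp).mpr ?_
    intro hdd
    apply hnd
    have := Int.natCast_dvd_natCast.mpr hdd
    rwa [Int.toNat_of_nonneg (by omega : (0:Int) ≤ p), Int.toNat_of_nonneg (by omega : (0:Int) ≤ r')] at this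
  have htn : (r' * p ^ e).toNat = p.toNat ^ e * r'.toNat := by
    have hcast : r' * p ^ e = ((p.toNat ^ e * r'.toNat : Nat) : Int) := by
      push_cast
      rw [Int.toNat_of_nonneg (by omega : (0:Int) ≤ p), Int.toNat_of_nonneg (by omega : (0:Int) ≤ r')]
      ring
    rw [hcast, Int.toNat_natCast]
  rw [htn]
  have hmul := (ArithmeticFunction.isMultiplicative_sigma (k := 1)).map_mul_of_coprime hco
  simp only [ArithmeticFunction.sigma_one_apply] at hmul
  rw [hmul]
  push_cast
  ring

theorem prime_dvd_int (r : Int) (h1 : 1 ≤ r) (hne : r ≠ 1) :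
    ∃ q : Nat, Nat.Prime q ∧ (q : Int) ∣ r := by
  obtain ⟨q, hq, hqd⟩ := Nat.exists_prime_and_dvd (n := r.toNat) (by omega)
  refine ⟨q, hq, ?_⟩
  have := Int.natCast_dvd_natCast.mpr hqd
  rwa [Int.toNat_of_nonneg (by omega)] at this

theorem pfLoopA_spec (B : Int) :
    ∀ (ps : List Int) (r : Int) (d : PySem.Dict Int Int),
    1 ≤ r → r ≤ B →
    ps.Pairwise (· < ·) →
    (∀ p ∈ ps, 2 ≤ p) →
    (∀ p ∈ ps, p ≤ B → Nat.Prime p.toNat) →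
    (∀ q : Nat, Nat.Prime q → (q : Int) ∣ r → (q : Int) ∈ ps) →
    (∀ k ∈ d.keys, ∀ p ∈ ps, k < p) →
    d.keys.Nodup →
    ∃ L : List (Int × Int),
      (pfLoopA ps d r).items = d.items ++ L ∧
      (L.map (fun pe => geomI pe.1 pe.2)).prod = sigmaI r := by
  intro ps
  induction ps with
  | nil =>
    intro r d h1 hB _ _ _ hfac _ _
    have hr1 : r = 1 := by
      by_contra hne
      obtain ⟨q, hq, hqd⟩ := prime_dvd_int r h1 hne
      exact absurd (hfac q hq hqd) (List.not_mem_nil)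
    subst hr1
    exact ⟨[], by simp [pfLoopA], by simp [sigmaI_one]⟩
  | cons p rest ih =>
    intro r d h1 hB hsort hge2 hprime hfac hkeys hnd
    rw [pfLoopA]
    by_cases hpr : p > r
    · rw [if_pos hpr]
      have hr1 : r = 1 := by
        by_contra hne
        obtain ⟨q, hq, hqd⟩ := prime_dvd_int r h1 hne
        have hqmem := hfac q hq hqd
        have hqler : (q : Int) ≤ r := Int.le_of_dvd (by omega) hqd
        rcases List.mem_cons.mp hqmem with hqp | hqrest
        · omega
        · have : p < (q : Int) := (List.pairwise_cons.mp hsort).1 _ hqrest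
          omega
      subst hr1
      exact ⟨[], by simp, by simp [sigmaI_one]⟩
    · rw [if_neg hpr]
      have hp2 : 2 ≤ p := hge2 p List.mem_cons_self
      obtain ⟨e, r', hdeq, hmul, hpnd, hr1'⟩ :=
        divideOutA_spec p hp2 (r.toNat + 1) r d h1 (by omega)
      have hpprime : Nat.Prime p.toNat := hprime p List.mem_cons_self (by omega)
      have hpe1 : (1:Int) ≤ p ^ e := one_le_pow₀ (by omega)
      have hr'r : r' ≤ r := by nlinarith
      have hsort' := (List.pairwise_cons.mp hsort).2
      have hge2' : ∀ q ∈ rest, 2 ≤ q := fun q hq => hge2 q (List.mem_cons_of_mem _ hq)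
      have hprime' : ∀ q ∈ rest, q ≤ B → Nat.Prime q.toNat :=
        fun q hq => hprime q (List.mem_cons_of_mem _ hq)
      have hfac' : ∀ q : Nat, Nat.Prime q → (q : Int) ∣ r' → (q : Int) ∈ rest := by
        intro q hq hqd
        have hqdr : (q : Int) ∣ r := hmul ▸ Dvd.dvd.mul_right hqd _
        rcases List.mem_cons.mp (hfac q hq hqdr) with hqp | hqrest
        · exfalso; exact hpnd (hqp ▸ hqd)
        · exact hqrest
      have hpnotkey : p ∉ d.keys := fun hpk => absurd (hkeys p hpk p List.mem_cons_self) (by omega)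
      have hsigma : sigmaI r = geomI p (e : Int) * sigmaI r' := by
        rw [hmul]; exact sigmaI_mul p r' hp2 hpprime e hr1' hpnd
      cases e with
      | zero =>
        simp only [hdeq, Function.iterate_zero, id]
        have hr'eq : r' = r := by simpa using hmul.symm
        subst hr'eq
        obtain ⟨L, hit, hpr'⟩ := ih r' d hr1' (by omega) hsort' hge2' hprime' hfac'
          (fun k hk q hq => hkeys k hk q (List.mem_cons_of_mem _ hq)) hnd
        exact ⟨L, hit, hpr'⟩
      | succ e0 =>
        simp only [hdeq]
        set d' := (fun dd => dd.modify p 0 (· + 1))^[e0 + 1] d with hd'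
        have hitems' : d'.items = d.items ++ [(p, ((e0 + 1 : Nat) : Int))] :=
          iterate_modify_spec p (e0 + 1) (by omega) d hnd hpnotkey
        have hkeys' : d'.keys = d.keys ++ [p] := by
          show d'.items.map (·.1) = _
          rw [hitems']; simp; rfl
        have hnd2 : d'.keys.Nodup := by
          rw [hkeys', List.nodup_append]
          refine ⟨hnd, List.nodup_singleton _, ?_⟩
          intro a ha b hb
          have hb' : b = p := by simpa using hb
          subst hb'
          intro hab
          exact hpnotkey (hab ▸ ha)
        have hkeyslt : ∀ k ∈ d'.keys, ∀ q ∈ rest, k < q := by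
          intro k hk q hq
          rw [hkeys'] at hk
          rcases List.mem_append.mp hk with hk | hk
          · exact hkeys k hk q (List.mem_cons_of_mem _ hq)
          · have hk' : k = p := by simpa using hk
            subst hk'
            exact (List.pairwise_cons.mp hsort).1 _ hq
        obtain ⟨L, hit, hprodL⟩ := ih r' d' hr1' (by omega) hsort' hge2' hprime' hfac' hkeyslt hnd2
        refine ⟨(p, ((e0 + 1 : Nat) : Int)) :: L, ?_, ?_⟩
        · rw [hit, hitems']; simp
        · simp only [List.map_cons, List.prod_cons, hprodL, hsigma]

theorem stepA_eq' (ps : List Int) (B t : Int) (h2 : 2 ≤ t) (hB : t ≤ B)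
    (hsort : ps.Pairwise (· < ·)) (hge2 : ∀ p ∈ ps, 2 ≤ p)
    (hprime : ∀ p ∈ ps, p ≤ B → Nat.Prime p.toNat)
    (hcomp : ∀ q : Nat, Nat.Prime q → (q : Int) ∣ t → (q : Int) ∈ ps) :
    stepA ps t = sigmaI t - t := by
  unfold stepA primeFactorsA
  obtain ⟨L, hit, hprod⟩ := pfLoopA_spec B ps t PySem.Dict.empty (by omega) hB hsort hge2 hprime
    hcomp (by rw [PySem.Dict.keys_empty]; intro k hk; exact absurd hk List.not_mem_nil)
    (by rw [PySem.Dict.keys_empty]; exact List.nodup_nil)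
  rw [hit, factorSum_eq]
  have hemp : PySem.Dict.empty.items = ([] : List (Int × Int)) := rfl
  rw [hemp]
  simp [hprod]

-- ---- A side: what the sieve of primes computes ----

-- generic fold lemmas
theorem length_foldl_set0 (js : List Int) (s : List Int) :
    (js.foldl (fun r j => PySem.List.pySetD r j 0) s).length = s.length := by
  induction js generalizing s with
  | nil => rfl
  | cons j js ih => rw [List.foldl_cons, ih, PySem.List.length_pySetD]

theorem getD_foldl_set0 (js : List Int) (s : List Int) (m : Int) (hm : 0 ≤ m)
    (hjs : ∀ j ∈ js, 0 ≤ j ∧ j.toNat < s.length) :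
    PySem.List.pyGetD (js.foldl (fun r j => PySem.List.pySetD r j 0) s) m 0 =
      if m ∈ js then 0 else PySem.List.pyGetD s m 0 := by
  induction js generalizing s with
  | nil => simp
  | cons j js ih =>
    rw [List.foldl_cons]
    have hj := hjs j List.mem_cons_self
    have hlen : (PySem.List.pySetD s j 0).length = s.length := PySem.List.length_pySetD s j 0
    rw [ih (PySem.List.pySetD s j 0) (by rw [hlen]; intro x hx; exact hjs x (List.mem_cons_of_mem _ hx))]
    have hget : PySem.List.pyGetD (PySem.List.pySetD s j 0) m 0 =
        if m = j then 0 else PySem.List.pyGetD s m 0 := by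
      have hj' : j = ((j.toNat : Nat) : Int) := by omega
      have hm' : m = ((m.toNat : Nat) : Int) := by omega
      conv_lhs => rw [hj', hm']
      rw [PySem.List.pyGetD_pySetD_natCast s j.toNat m.toNat 0 0 hj.2]
      by_cases hmj : m = j
      · simp [hmj]
      · have hne : ¬ m.toNat = j.toNat := by omega
        rw [if_neg hne, if_neg hmj, ← hm']
    by_cases hmem : m ∈ js
    · simp [hmem]
    · simp only [if_neg hmem, hget]
      by_cases hmj : m = j
      · subst hmj; simp [List.mem_cons]
      · simp [List.mem_cons, hmj, hmem]

def sieveBody (n : Int) : List Int → Nat → List Int := fun rst i =>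
  if PySem.List.pyGetD rst (i : Int) 0 ≠ 0 then
    (PySem.List.pyRange (2 * (i : Int)) (n + 1) (i : Int)).foldl
      (fun r j => PySem.List.pySetD r j 0) rst
  else rst

def sieveState (n : Int) (k : Nat) : List Int :=
  (List.range k).foldl (sieveBody n) ([0, 0] ++ List.replicate n.toNat 1)

def sieveCond (n : Int) (k m : Nat) : Prop :=
  2 ≤ m ∧ ¬∃ q : Nat, Nat.Prime q ∧ q < k ∧ q ∣ m ∧ q ≠ m ∧ (m : Int) ≤ n

theorem sieve_invariant (n : Int) (k : Nat) :
    (sieveState n k).length = n.toNat + 2 ∧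
    ∀ m : Nat, m < n.toNat + 2 →
      (sieveCond n k m → PySem.List.pyGetD (sieveState n k) (m : Int) 0 = 1) ∧
      (¬ sieveCond n k m → PySem.List.pyGetD (sieveState n k) (m : Int) 0 = 0) := by
  induction k with
  | zero =>
    constructor
    · simp [sieveState]
    · intro m hm
      have hval : PySem.List.pyGetD (sieveState n 0) (m : Int) 0 = if 2 ≤ m then 1 else 0 := by
        show PySem.List.pyGetD ([0, 0] ++ List.replicate n.toNat 1) (m : Int) 0 = _
        rw [PySem.List.pyGetD_of_nonneg _ _ (by positivity), Int.toNat_natCast]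
        match m, hm with
        | 0, _ => simp
        | 1, _ => simp
        | (m + 2), hm =>
          rw [List.getD_eq_getElem _ _ (by simpa using hm)]
          simp [List.getElem_replicate]
      refine ⟨fun hc => by rw [hval, if_pos hc.1], fun hc => ?_⟩
      have h2 : ¬ 2 ≤ m := by
        intro h2
        exact hc ⟨h2, by rintro ⟨q, hq, hqk, -⟩; omega⟩
      rw [hval, if_neg h2]
  | succ k ih =>
    obtain ⟨hlen, hinv⟩ := ih
    have hstep : sieveState n (k + 1) = sieveBody n (sieveState n k) k := by
      show (List.range (k + 1)).foldl _ _ = _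
      rw [List.range_succ, List.foldl_append, List.foldl_cons, List.foldl_nil]
      rfl
    by_cases hkbig : n.toNat + 2 ≤ k
    · -- k out of range: flag read is the default 0, no marking, no new markers
      have hflag : PySem.List.pyGetD (sieveState n k) (k : Int) 0 = 0 := by
        rw [PySem.List.pyGetD_of_nonneg _ _ (by positivity), Int.toNat_natCast]
        exact List.getD_eq_default _ _ (by omega)
      have hsame : sieveState n (k + 1) = sieveState n k := by
        rw [hstep, sieveBody, if_neg (by simp [hflag])]
      have hcond : ∀ m : Nat, m < n.toNat + 2 → (sieveCond n (k + 1) m ↔ sieveCond n k m) := by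
        intro m hm
        unfold sieveCond
        constructor
        · rintro ⟨h2, hno⟩
          exact ⟨h2, fun ⟨q, hq, hqk, hrest⟩ => hno ⟨q, hq, by omega, hrest⟩⟩
        · rintro ⟨h2, hno⟩
          refine ⟨h2, ?_⟩
          rintro ⟨q, hq, hqk, hqd, hqm, hmn⟩
          rcases Nat.lt_or_ge q k with hlt | hge
          · exact hno ⟨q, hq, hlt, hqd, hqm, hmn⟩
          · have hqk' : q = k := by omega
            subst hqk'
            have : q ≤ m := Nat.le_of_dvd (by omega) hqd
            omega
      refine ⟨by rw [hsame]; exact hlen, ?_⟩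
      intro m hm
      rw [hsame]
      exact ⟨fun hc => (hinv m hm).1 ((hcond m hm).mp hc),
             fun hc => (hinv m hm).2 (fun hc' => hc ((hcond m hm).mpr hc'))⟩
    · -- k in range
      rw [Nat.not_le] at hkbig
      have hflag := hinv k hkbig
      by_cases hck : sieveCond n k k
      · -- flag at k is 1: mark multiples of k
        have hk2 : 2 ≤ k := hck.1
        have hmark : sieveState n (k + 1) =
            (PySem.List.pyRange (2 * (k : Int)) (n + 1) (k : Int)).foldl
              (fun r j => PySem.List.pySetD r j 0) (sieveState n k) := by
          rw [hstep, sieveBody, if_pos (by simp [hflag.1 hck])]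
        -- k is prime whenever it could mark anything in range
        have hkprime : (k : Int) ≤ n → Nat.Prime k := by
          intro hkn
          by_contra hnp
          obtain ⟨q, hq, hqd⟩ := Nat.exists_prime_and_dvd (n := k) (by omega)
          have hqk : q ≠ k := fun h => hnp (h ▸ hq)
          have hqlt : q < k := lt_of_le_of_ne (Nat.le_of_dvd (by omega) hqd) hqk
          exact hck.2 ⟨q, hq, hqlt, hqd, hqk, hkn⟩
        have hmemIff : ∀ m : Nat, ((m : Int) ∈ PySem.List.pyRange (2 * (k : Int)) (n + 1) (k : Int))
            ↔ (2 * k ≤ m ∧ (m : Int) ≤ n ∧ k ∣ m) := by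
          intro m
          rw [PySem.List.mem_pyRange_iff_of_pos (by omega : (0:Int) < (k : Int))]
          constructor
          · rintro ⟨h1, h2, c, hc⟩
            refine ⟨by omega, by omega, ?_⟩
            have hm' : (m : Int) = (k : Int) * c + 2 * (k : Int) := by omega
            have : (k : Int) ∣ (m : Int) := ⟨c + 2, by rw [hm']; ring⟩
            exact_mod_cast this
          · rintro ⟨h1, h2, hdvd⟩
            have hdvd' : (k : Int) ∣ (m : Int) := by exact_mod_cast hdvd
            obtain ⟨c, hc⟩ := hdvd'
            exact ⟨by omega, by omega, c - 2, by rw [hc]; ring⟩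
        refine ⟨by rw [hmark, length_foldl_set0]; exact hlen, ?_⟩
        intro m hm
        have hgetD : PySem.List.pyGetD (sieveState n (k + 1)) (m : Int) 0 =
            if (m : Int) ∈ PySem.List.pyRange (2 * (k : Int)) (n + 1) (k : Int) then 0
            else PySem.List.pyGetD (sieveState n k) (m : Int) 0 := by
          rw [hmark]
          refine getD_foldl_set0 _ _ _ (by positivity) ?_
          intro j hj
          have hj' := (PySem.List.mem_pyRange_iff_of_pos (by omega : (0:Int) < (k : Int)) j).mp hj
          refine ⟨by omega, ?_⟩
          rw [hlen]
          omega
        constructor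
        · -- sieveCond (k+1) m : value stays 1
          rintro ⟨h2, hno⟩
          have hcondk : sieveCond n k m :=
            ⟨h2, fun ⟨q, hq, hqk, hrest⟩ => hno ⟨q, hq, by omega, hrest⟩⟩
          have hnotmem : ¬ (m : Int) ∈ PySem.List.pyRange (2 * (k : Int)) (n + 1) (k : Int) := by
            rw [hmemIff]
            rintro ⟨h2k, hmn, hkd⟩
            exact hno ⟨k, hkprime (by omega), by omega, hkd, by omega, hmn⟩
          rw [hgetD, if_neg hnotmem]
          exact (hinv m hm).1 hcondk
        · -- ¬ sieveCond (k+1) m : value becomes/stays 0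
          intro hno
          rw [hgetD]
          by_cases hcondk : sieveCond n k m
          · -- the reason must be the new marker q = k
            have hmarker : Nat.Prime k ∧ k ∣ m ∧ k ≠ m ∧ (m : Int) ≤ n := by
              by_contra hcon
              apply hno
              refine ⟨hcondk.1, ?_⟩
              rintro ⟨q, hq, hqk1, hqd, hqm, hmn⟩
              rcases Nat.lt_or_ge q k with hlt | hge
              · exact hcondk.2 ⟨q, hq, hlt, hqd, hqm, hmn⟩
              · have : q = k := by omega
                subst this
                exact hcon ⟨hq, hqd, hqm, hmn⟩
            have hmem : (m : Int) ∈ PySem.List.pyRange (2 * (k : Int)) (n + 1) (k : Int) := by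
              rw [hmemIff]
              obtain ⟨hkp, hkd, hkm, hmn⟩ := hmarker
              obtain ⟨c, hc⟩ := id hkd
              have hm2 : 2 ≤ m := hcondk.1
              have hc2 : 2 ≤ c := by
                by_contra hlt
                have hc01 : c = 0 ∨ c = 1 := by omega
                rcases hc01 with rfl | rfl
                · rw [Nat.mul_zero] at hc; omega
                · rw [Nat.mul_one] at hc; omega
              refine ⟨?_, hmn, hkd⟩
              calc 2 * k ≤ c * k := Nat.mul_le_mul_right _ hc2
                _ = k * c := Nat.mul_comm _ _
                _ = m := hc.symm
            rw [if_pos hmem]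
          · split
            · rfl
            · exact (hinv m hm).2 hcondk
      · -- flag at k is 0: skip
        have hsame : sieveState n (k + 1) = sieveState n k := by
          rw [hstep, sieveBody, if_neg (by simp [hflag.2 hck])]
        have hcond : ∀ m : Nat, (sieveCond n (k + 1) m ↔ sieveCond n k m) := by
          intro m
          unfold sieveCond
          constructor
          · rintro ⟨h2, hno⟩
            exact ⟨h2, fun ⟨q, hq, hqk, hrest⟩ => hno ⟨q, hq, by omega, hrest⟩⟩
          · rintro ⟨h2, hno⟩
            refine ⟨h2, ?_⟩
            rintro ⟨q, hq, hqk1, hqd, hqm, hmn⟩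
            rcases Nat.lt_or_ge q k with hlt | hge
            · exact hno ⟨q, hq, hlt, hqd, hqm, hmn⟩
            · have hqk' : q = k := by omega
              subst hqk'
              -- q = k prime would make sieveCond n k k true
              apply hck
              refine ⟨hq.two_le, ?_⟩
              rintro ⟨q', hq', hq'k, hq'd, hq'ne, hkn⟩
              exact hq'ne ((Nat.Prime.eq_one_or_self_of_dvd hq q' hq'd).resolve_left hq'.one_lt.ne')
        refine ⟨by rw [hsame]; exact hlen, ?_⟩
        intro m hm
        rw [hsame]
        exact ⟨fun hc => (hinv m hm).1 ((hcond m).mp hc),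
               fun hc => (hinv m hm).2 (fun hc' => hc ((hcond m).mpr hc'))⟩

theorem primesA_char (n : Int) :
    primesA n = ((PySem.List.enumerate (sieveState n (n.toNat + 2))).filter
      (fun p => p.2 != 0)).map (·.1) := by
  have h : ([0, 0] ++ List.replicate n.toNat 1 : List Int).length = n.toNat + 2 := by
    simp only [List.length_append, List.length_replicate, List.length_cons, List.length_nil]
    omega
  unfold primesA sieveState sieveBody
  dsimp only
  rw [h]

theorem mem_primesA (n : Int) (x : Int) :
    x ∈ primesA n ↔ ∃ m : Nat, m < n.toNat + 2 ∧ x = (m : Int) ∧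
      PySem.List.pyGetD (sieveState n (n.toNat + 2)) (m : Int) 0 ≠ 0 := by
  have hlen := (sieve_invariant n (n.toNat + 2)).1
  rw [primesA_char, List.mem_map]
  constructor
  · rintro ⟨p, hp, rfl⟩
    rw [List.mem_filter] at hp
    obtain ⟨hpe, hp2⟩ := hp
    obtain ⟨m, hmlt, rfl⟩ := (PySem.List.mem_enumerate_iff _ _ _).mp hpe
    refine ⟨m, by omega, by simp, ?_⟩
    have : PySem.List.pyGetD (sieveState n (n.toNat + 2)) (m : Int) 0
        = (sieveState n (n.toNat + 2))[m] := by
      rw [PySem.List.pyGetD_of_nonneg _ _ (by positivity), Int.toNat_natCast]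
      exact List.getD_eq_getElem _ _ _
    rw [this]
    simpa using hp2
  · rintro ⟨m, hm, rfl, hflag⟩
    have hmlt : m < (sieveState n (n.toNat + 2)).length := by omega
    refine ⟨((m : Int), (sieveState n (n.toNat + 2))[m]), ?_, by simp⟩
    rw [List.mem_filter]
    constructor
    · rw [PySem.List.mem_enumerate_iff]
      exact ⟨m, hmlt, by simp⟩
    · have : PySem.List.pyGetD (sieveState n (n.toNat + 2)) (m : Int) 0
          = (sieveState n (n.toNat + 2))[m] := by
        rw [PySem.List.pyGetD_of_nonneg _ _ (by positivity), Int.toNat_natCast]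
        exact List.getD_eq_getElem _ _ _
      rw [this] at hflag
      simpa using hflag

theorem final_flag (n : Int) (m : Nat) (hm : m < n.toNat + 2) :
    (PySem.List.pyGetD (sieveState n (n.toNat + 2)) (m : Int) 0 ≠ 0) ↔
      (2 ≤ m ∧ ((m : Int) ≤ n → Nat.Prime m)) := by
  have hinv := (sieve_invariant n (n.toNat + 2)).2 m hm
  constructor
  · intro hne
    have hc : sieveCond n (n.toNat + 2) m := by
      by_contra hno
      exact hne (hinv.2 hno)
    obtain ⟨h2, hnoq⟩ := hc
    refine ⟨h2, fun hmn => ?_⟩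
    by_contra hnp
    obtain ⟨q, hq, hqd⟩ := Nat.exists_prime_and_dvd (n := m) (by omega)
    have hqm : q ≠ m := fun h => hnp (h ▸ hq)
    have hqlt : q < m := lt_of_le_of_ne (Nat.le_of_dvd (by omega) hqd) hqm
    exact hnoq ⟨q, hq, by omega, hqd, hqm, hmn⟩
  · rintro ⟨h2, hprime⟩
    have hc : sieveCond n (n.toNat + 2) m := by
      refine ⟨h2, ?_⟩
      rintro ⟨q, hq, hqlt, hqd, hqm, hmn⟩
      have hmp := hprime hmn
      exact hqm ((Nat.Prime.eq_one_or_self_of_dvd hmp q hqd).resolve_left hq.one_lt.ne')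
    rw [hinv.1 hc]
    omega

theorem primesA_sorted (n : Int) : (primesA n).Pairwise (· < ·) := by
  rw [primesA_char]
  exact List.Pairwise.map _ (fun a b h => h)
    (List.Pairwise.filter _ (PySem.List.pairwise_lt_enumerate _ 0))

theorem primesA_ge_two (n : Int) : ∀ p ∈ primesA n, 2 ≤ p := by
  intro p hp
  obtain ⟨m, hm, rfl, hflag⟩ := (mem_primesA n p).mp hp
  have := ((final_flag n m hm).mp hflag).1
  omega

theorem primesA_prime (n : Int) : ∀ p ∈ primesA n, p ≤ n → Nat.Prime p.toNat := by
  intro p hp hpn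
  obtain ⟨m, hm, rfl, hflag⟩ := (mem_primesA n p).mp hp
  have h := (final_flag n m hm).mp hflag
  rw [Int.toNat_natCast]
  exact h.2 hpn

theorem primesA_complete (n : Int) (q : Int) (hq : Nat.Prime q.toNat) (h2 : 2 ≤ q) (hn : q ≤ n) :
    q ∈ primesA n := by
  rw [mem_primesA]
  refine ⟨q.toNat, by omega, by omega, ?_⟩
  rw [final_flag n q.toNat (by omega)]
  exact ⟨by omega, fun _ => hq⟩

-- ---- A side: stepA is the proper-divisor sum ----

theorem stepA_eq (n t : Int) (h2 : 2 ≤ t) (hn : t ≤ n) :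
    stepA (primesA n) t = sigmaI t - t := by
  refine stepA_eq' (primesA n) n t h2 hn (primesA_sorted n) (primesA_ge_two n)
    (primesA_prime n) ?_
  intro q hq hqd
  have hq2 : 2 ≤ (q : Int) := by exact_mod_cast hq.two_le
  have hqt : (q : Int) ≤ t := Int.le_of_dvd (by omega) hqd
  exact primesA_complete n (q : Int) (by simpa using hq) hq2 (by omega)

-- proper-divisor sums of t ≥ 2 stay ≥ 1 (so a chain value that passes the checks
-- stays in [2, n])
theorem sigmaI_ge (t : Int) (h2 : 2 ≤ t) : t + 1 ≤ sigmaI t := by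
  have hm : 2 ≤ t.toNat := by omega
  have h1 : 1 ∈ (t.toNat).properDivisors := Nat.one_mem_properDivisors_iff_one_lt.mpr (by omega)
  have hp : 1 ≤ ∑ d ∈ (t.toNat).properDivisors, d :=
    Finset.single_le_sum (f := fun d => d) (fun i _ => Nat.zero_le i) h1
  have := Nat.sum_divisors_eq_sum_properDivisors_add_self (n := t.toNat)
  unfold sigmaI
  omega

-- ---- B side: the sieve entry at m is the proper-divisor sum ----

theorem nodup_pyRange_pos (a b s : Int) (hs : 0 < s) : (PySem.List.pyRange a b s).Nodup := by
  rw [PySem.List.pyRange_of_pos a b hs]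
  refine List.Nodup.map ?_ (List.nodup_range)
  intro x y hxy
  have hxy' : a + s * (x : Int) = a + s * (y : Int) := hxy
  have h2 : s * (x : Int) = s * (y : Int) := by omega
  exact_mod_cast mul_left_cancel₀ (by omega : (s : Int) ≠ 0) h2

theorem length_foldl_addset (js : List Int) (dd : Int) (s : List Int) :
    (js.foldl (fun r j => PySem.List.pySetD r j (PySem.List.pyGetD r j 0 + dd)) s).length
      = s.length := by
  induction js generalizing s with
  | nil => rfl
  | cons j js ih => rw [List.foldl_cons, ih, PySem.List.length_pySetD]

theorem getD_foldl_addset (js : List Int) (dd : Int) (s : List Int) (m : Int) (hm : 0 ≤ m)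
    (hjs : ∀ j ∈ js, 0 ≤ j ∧ j.toNat < s.length) (hnd : js.Nodup) :
    PySem.List.pyGetD (js.foldl (fun r j => PySem.List.pySetD r j (PySem.List.pyGetD r j 0 + dd)) s) m 0 =
      PySem.List.pyGetD s m 0 + if m ∈ js then dd else 0 := by
  induction js generalizing s with
  | nil => simp
  | cons j js ih =>
    rw [List.foldl_cons]
    have hj := hjs j List.mem_cons_self
    have hlen : (PySem.List.pySetD s j (PySem.List.pyGetD s j 0 + dd)).length = s.length :=
      PySem.List.length_pySetD _ _ _
    rw [ih (PySem.List.pySetD s j (PySem.List.pyGetD s j 0 + dd))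
        (by rw [hlen]; intro x hx; exact hjs x (List.mem_cons_of_mem _ hx)) hnd.of_cons]
    have hget : ∀ x : Int, 0 ≤ x →
        PySem.List.pyGetD (PySem.List.pySetD s j (PySem.List.pyGetD s j 0 + dd)) x 0 =
        if x = j then PySem.List.pyGetD s j 0 + dd else PySem.List.pyGetD s x 0 := by
      intro x hx
      have hj' : j = ((j.toNat : Nat) : Int) := by omega
      have hx' : x = ((x.toNat : Nat) : Int) := by omega
      conv_lhs => rw [hj', hx']
      rw [PySem.List.pyGetD_pySetD_natCast s j.toNat x.toNat _ 0 hj.2]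
      by_cases hxj : x = j
      · rw [if_pos (by omega : x.toNat = j.toNat), if_pos hxj, ← hj']
      · have hne : ¬ x.toNat = j.toNat := by omega
        rw [if_neg hne, if_neg hxj, ← hx']
    by_cases hmj : m = j
    · subst hmj
      have hnm : m ∉ js := (List.nodup_cons.mp hnd).1
      rw [if_neg hnm, hget m hm, if_pos rfl]
      simp [List.mem_cons]
    · rw [hget m hm, if_neg hmj]
      by_cases hmem : m ∈ js
      · simp [hmem, List.mem_cons, hmj]
      · simp [hmem, List.mem_cons, hmj]

theorem inner_getD (n d : Int) (hd : 1 ≤ d) (s : List Int) (hs : s.length = (n + 1).toNat)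
    (m : Int) (hm : 0 ≤ m) :
    PySem.List.pyGetD
      ((PySem.List.pyRange (2 * d) (n + 1) d).foldl
        (fun s m => PySem.List.pySetD s m (PySem.List.pyGetD s m 0 + d)) s) m 0 =
      PySem.List.pyGetD s m 0 + if (d ∣ m ∧ 2 * d ≤ m ∧ m ≤ n) then d else 0 := by
  rw [getD_foldl_addset _ _ _ _ hm ?hjs (nodup_pyRange_pos _ _ _ (by omega))]
  case hjs =>
    intro j hj
    have := (PySem.List.mem_pyRange_iff_of_pos (by omega : (0:Int) < d) j).mp hj
    exact ⟨by omega, by omega⟩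
  congr 1
  by_cases hmem : m ∈ PySem.List.pyRange (2 * d) (n + 1) d
  · have h := (PySem.List.mem_pyRange_iff_of_pos (by omega : (0:Int) < d) m).mp hmem
    obtain ⟨h1, h2, c, hc⟩ := h
    have hm' : m = d * c + 2 * d := by omega
    have hdm : d ∣ m := ⟨c + 2, by rw [hm']; ring⟩
    rw [if_pos hmem, if_pos ⟨hdm, by omega, by omega⟩]
  · rw [if_neg hmem]
    by_cases hcond : d ∣ m ∧ 2 * d ≤ m ∧ m ≤ n
    · exfalso
      apply hmem
      rw [PySem.List.mem_pyRange_iff_of_pos (by omega : (0:Int) < d)]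
      obtain ⟨⟨c, hc⟩, h1, h2⟩ := hcond
      exact ⟨by omega, by omega, c - 2, by rw [hc]; ring⟩
    · rw [if_neg hcond]

theorem outer_getD (n : Int) (ds : List Int) (hds : ∀ d ∈ ds, 1 ≤ d) (s : List Int)
    (hs : s.length = (n + 1).toNat) (m : Int) (hm : 0 ≤ m) :
    PySem.List.pyGetD
      (ds.foldl (fun s d =>
        (PySem.List.pyRange (2 * d) (n + 1) d).foldl
          (fun s m => PySem.List.pySetD s m (PySem.List.pyGetD s m 0 + d)) s) s) m 0 =
      PySem.List.pyGetD s m 0 +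
        (ds.map (fun d => if (d ∣ m ∧ 2 * d ≤ m ∧ m ≤ n) then d else 0)).sum := by
  induction ds generalizing s with
  | nil => simp
  | cons d ds ih =>
    rw [List.foldl_cons, List.map_cons, List.sum_cons]
    have hd := hds d List.mem_cons_self
    have hlen' : ((PySem.List.pyRange (2 * d) (n + 1) d).foldl
        (fun s m => PySem.List.pySetD s m (PySem.List.pyGetD s m 0 + d)) s).length = (n + 1).toNat := by
      rw [length_foldl_addset]; exact hs
    rw [ih (fun x hx => hds x (List.mem_cons_of_mem _ hx)) _ hlen']
    rw [inner_getD n d hd s hs m hm]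
    ring

theorem sieveB_getD (n m : Int) (h2 : 2 ≤ m) (hn : m ≤ n) :
    PySem.List.pyGetD (sieveB n) m 0 = sigmaI m - m := by
  unfold sieveB
  rw [outer_getD n _ (fun d hd => ((PySem.List.mem_pyRange_one).mp hd).1) _
      (List.length_replicate) m (by omega)]
  have hz : PySem.List.pyGetD (List.replicate (n + 1).toNat (0 : Int)) m 0 = 0 := by
    rw [PySem.List.pyGetD_of_nonneg _ _ (by omega)]
    rcases Nat.lt_or_ge m.toNat (n + 1).toNat with h | h
    · rw [List.getD_eq_getElem _ _ (by simpa using h)]; simp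
    · exact List.getD_eq_default _ _ (by simpa using h)
  rw [hz, zero_add]
  -- turn the list sum into the proper-divisor sum
  have hn1 : (n + 1 - 1 : Int).toNat = n.toNat := by omega
  rw [PySem.List.pyRange_one, List.map_map, hn1, list_sum_range_eq]
  have hM2 : 2 ≤ m.toNat := by omega
  have hMn : m.toNat ≤ n.toNat := by omega
  have hper : ∀ i ∈ Finset.range n.toNat,
      ((fun d => if (d ∣ m ∧ 2 * d ≤ m ∧ m ≤ n) then d else 0) ∘ fun k : Nat => (1 : Int) + k) i
      = ((if (1 + i) ∈ m.toNat.properDivisors then 1 + i else 0 : Nat) : Int) := by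
    intro i _
    simp only [Function.comp, Nat.mem_properDivisors]
    by_cases hc : (1 + i) ∣ m.toNat ∧ 1 + i < m.toNat
    · rw [if_pos hc]
      have hdvd : ((1 + i : Int)) ∣ m := by
        have h1 : ((1 + i : Nat) : Int) ∣ ((m.toNat : Nat) : Int) := Int.natCast_dvd_natCast.mpr hc.1
        rw [Int.toNat_of_nonneg (by omega)] at h1
        push_cast at h1
        exact h1
      have h2d : 2 * ((1 : Int) + i) ≤ m := by
        obtain ⟨c, hcc⟩ := hc.1
        have hc2 : 2 ≤ c := by
          by_contra hlt
          have hc01 : c = 0 ∨ c = 1 := by omega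
          rcases hc01 with rfl | rfl
          · rw [Nat.mul_zero] at hcc; omega
          · rw [Nat.mul_one] at hcc; omega
        have : 2 * (1 + i) ≤ m.toNat := by
          calc 2 * (1 + i) ≤ c * (1 + i) := Nat.mul_le_mul_right _ hc2
            _ = (1 + i) * c := Nat.mul_comm _ _
            _ = m.toNat := hcc.symm
        omega
      rw [if_pos ⟨hdvd, h2d, hn⟩]
      push_cast
      ring
    · rw [if_neg hc]
      rw [if_neg ?hneg]
      · simp
      case hneg =>
        rintro ⟨hdvd, h2d, -⟩
        apply hc
        have hcast : ((1 + i : Nat) : Int) ∣ ((m.toNat : Nat) : Int) := by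
          rw [Int.toNat_of_nonneg (by omega : (0:Int) ≤ m)]
          push_cast
          exact hdvd
        exact ⟨Int.natCast_dvd_natCast.mp hcast, by omega⟩
  rw [Finset.sum_congr rfl hper]
  rw [← Nat.cast_sum]
  have hshift : ∑ i ∈ Finset.range n.toNat, (if (1 + i) ∈ m.toNat.properDivisors then 1 + i else 0)
      = ∑ d ∈ Finset.range (n.toNat + 1), (if d ∈ m.toNat.properDivisors then d else 0) := by
    rw [Finset.sum_range_succ']
    have h0 : (if (0 : Nat) ∈ m.toNat.properDivisors then (0 : Nat) else 0) = 0 := by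
      split <;> rfl
    rw [h0, add_zero]
    refine Finset.sum_congr rfl fun i _ => by rw [Nat.add_comm i 1]
  rw [hshift]
  rw [Finset.sum_ite_mem]
  have hsub : m.toNat.properDivisors ⊆ Finset.range (n.toNat + 1) := by
    intro d hd
    rw [Nat.mem_properDivisors] at hd
    rw [Finset.mem_range]
    omega
  rw [Finset.inter_eq_right.mpr hsub]
  unfold sigmaI
  have := Nat.sum_divisors_eq_sum_properDivisors_add_self (n := m.toNat)
  omega

-- ---- the two chain walks agree ----

theorem chainLoop_congr (n : Int) (s : List Int)
    (hstep : ∀ t, 2 ≤ t → t ≤ n → stepA (primesA n) t = PySem.List.pyGetD s t 0)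
    (hpos : ∀ t, 2 ≤ t → t ≤ n → 1 ≤ stepA (primesA n) t) :
    ∀ (fuel : Nat) (met : PySem.Set Int) (chain : List Int) (t : Int),
      2 ≤ t → t ≤ n →
      chainLoopA n (primesA n) fuel met chain t = chainLoopB n s fuel met chain t := by
  intro fuel
  induction fuel with
  | zero => intro met chain t _ _; rfl
  | succ k ih =>
    intro met chain t h2 hn
    show (let t' := stepA (primesA n) t;
          if t' ≤ n ∧ t' ≠ 1 ∧ t' ∉ met ∧ t' ∉ chain then
            chainLoopA n (primesA n) k (PySem.Set.add met t') (chain ++ [t']) t'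
          else (met, chain, t')) = _
    show _ = (let t' := PySem.List.pyGetD s t 0;
          if t' > n ∨ t' = 1 ∨ t' ∈ met ∨ t' ∈ chain then (met, chain, t')
          else chainLoopB n s k (PySem.Set.add met t') (chain ++ [t']) t')
    rw [← hstep t h2 hn]
    set u := stepA (primesA n) t with hu
    by_cases hc : u ≤ n ∧ u ≠ 1 ∧ u ∉ met ∧ u ∉ chain
    · have hc' : ¬ (u > n ∨ u = 1 ∨ u ∈ met ∨ u ∈ chain) := by
        rintro (h | h | h | h)
        · omega
        · exact hc.2.1 h
        · exact hc.2.2.1 h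
        · exact hc.2.2.2 h
      simp only [if_pos hc, if_neg hc']
      have hu1 : 1 ≤ u := hpos t h2 hn
      exact ih _ _ u (by rcases hc with ⟨_, h1, _⟩; omega) hc.1
    · have hc' : u > n ∨ u = 1 ∨ u ∈ met ∨ u ∈ chain := by
        by_contra hno
        simp only [not_or] at hno
        exact hc ⟨by omega, hno.2.1, hno.2.2.1, hno.2.2.2⟩
      simp only [if_neg hc, if_pos hc']

-- ===== VERDICT (by name: the statement is the Claim_ definition above) =====
theorem solution_spec : Claim_equal_solution := by
  intro n _
  show solution n = solution_alt n
  unfold solution solution_alt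
  dsimp only
  have hstep : ∀ t, 2 ≤ t → t ≤ n → stepA (primesA n) t = PySem.List.pyGetD (sieveB n) t 0 := by
    intro t h2 hn; rw [stepA_eq n t h2 hn, sieveB_getD n t h2 hn]
  have hpos : ∀ t, 2 ≤ t → t ≤ n → 1 ≤ stepA (primesA n) t := by
    intro t h2 hn; rw [stepA_eq n t h2 hn]; have := sigmaI_ge t h2; omega
  congr 2
  apply PySem.List.foldl_congr_mem
  intro st i hi
  have hi' : 2 ≤ i ∧ i < n + 1 := (PySem.List.mem_pyRange_one).mp hi
  by_cases hmem : i ∈ st.1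
  · simp only [if_pos hmem]
  · simp only [if_neg hmem]
    rw [chainLoop_congr n (sieveB n) hstep hpos (n.toNat + 2) (PySem.Set.add st.1 i) [i] i
          hi'.1 (by omega)]
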